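-- pv_equiv track=rewrite | github.com/ricardotemporal/seu-paozinho | utils.py | separar_produtos
-- ===== SOURCE A (Python) =====
-- def eh_baby(nome: str) -> bool:
--     return "Baby" in nome
--
-- def separar_produtos(produtos: list[dict]) -> tuple[list[dict], list[dict]]:
--     """Retorna (kits, avulsas), com Tradicionais antes de Baby em cada grupo."""
--     def ordenar(lst):
--         return (
--             [p for p in lst if not eh_baby(p["nome"])]
--             + [p for p in lst if eh_baby(p["nome"])]
--         )
--     kits    = ordenar([p for p in produtos if "Avulsa" not in p["nome"]])
--     avulsas = ordenar([p for p in produtos if "Avulsa" in p["nome"]])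
--     return kits, avulsas
-- ===== SOURCE B (Python) =====
-- def eh_baby(nome: str) -> bool:
--     return "Baby" in nome
--
-- def separar_produtos(produtos):
--     """Retorna (kits, avulsas), com Tradicionais antes de Baby em cada grupo."""
--     kits_trad, kits_baby, av_trad, av_baby = [], [], [], []
--     for p in produtos:
--         nome = p["nome"]
--         is_avulsa = "Avulsa" in nome
--         is_baby = eh_baby(nome)
--         if is_avulsa:
--             (av_baby if is_baby else av_trad).append(p)
--         else:
--             (kits_baby if is_baby else kits_trad).append(p)
--     return kits_trad + kits_baby, av_trad + av_baby
-- ===== Notes on version B (the rewrite author's own statement) =====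
-- stated objective: faster
-- what changed: Replaces A's six list-comprehension scans (two outer filters, each re-scanned twice by ordenar) with a single pass that appends each product to one of four buckets, concatenated at the end.
import Mathlib
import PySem

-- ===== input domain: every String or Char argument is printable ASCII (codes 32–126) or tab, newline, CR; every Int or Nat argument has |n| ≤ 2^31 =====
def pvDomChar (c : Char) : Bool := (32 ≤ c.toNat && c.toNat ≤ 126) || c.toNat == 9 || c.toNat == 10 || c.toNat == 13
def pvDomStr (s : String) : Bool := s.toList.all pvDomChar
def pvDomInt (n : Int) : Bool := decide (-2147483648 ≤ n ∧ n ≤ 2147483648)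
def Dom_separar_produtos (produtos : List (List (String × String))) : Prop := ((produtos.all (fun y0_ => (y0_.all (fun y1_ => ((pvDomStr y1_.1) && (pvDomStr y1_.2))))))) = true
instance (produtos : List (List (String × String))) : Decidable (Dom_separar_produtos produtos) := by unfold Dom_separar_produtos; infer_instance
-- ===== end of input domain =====

-- B replaces A's six list-comprehension scans with one pass into four buckets (constant-factor speedup).


-- ===== PORT A =====
def eh_baby (nome : String) : Bool := PySem.Str.isIn "Baby" nome

-- p["nome"] (total form; Pre_ guarantees the key exists, matching Python's KeyError)
def nomeOf (p : List (String × String)) : String := (p.lookup "nome").getD ""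

def ordenar (lst : List (List (String × String))) : List (List (String × String)) :=
  (lst.filter (fun p => !eh_baby (nomeOf p))) ++ (lst.filter (fun p => eh_baby (nomeOf p)))

def separar_produtos (produtos : List (List (String × String))) : (List (List (String × String))) × (List (List (String × String))) :=
  let kits := ordenar (produtos.filter (fun p => !PySem.Str.isIn "Avulsa" (nomeOf p)))
  let avulsas := ordenar (produtos.filter (fun p => PySem.Str.isIn "Avulsa" (nomeOf p)))
  (kits, avulsas)

-- ===== PORT B =====
def sepStep (acc : List (List (String × String)) × List (List (String × String)) × List (List (String × String)) × List (List (String × String)))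
    (p : List (String × String)) :
    List (List (String × String)) × List (List (String × String)) × List (List (String × String)) × List (List (String × String)) :=
  let nome := nomeOf p
  let isAvulsa := PySem.Str.isIn "Avulsa" nome
  let isBaby := eh_baby nome
  if isAvulsa then
    if isBaby then (acc.1, acc.2.1, acc.2.2.1, acc.2.2.2 ++ [p])
    else (acc.1, acc.2.1, acc.2.2.1 ++ [p], acc.2.2.2)
  else
    if isBaby then (acc.1, acc.2.1 ++ [p], acc.2.2.1, acc.2.2.2)
    else (acc.1 ++ [p], acc.2.1, acc.2.2.1, acc.2.2.2)

def separar_produtos_alt (produtos : List (List (String × String))) : (List (List (String × String))) × (List (List (String × String))) :=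
  let r := produtos.foldl sepStep ([], [], [], [])
  (r.1 ++ r.2.1, r.2.2.1 ++ r.2.2.2)

-- ===== PRECONDITION & SPEC =====
-- Pre_ excludes products without a "nome" key, on which the Python A raises KeyError.
def Pre_separar_produtos (produtos : List (List (String × String))) : Prop :=
  (produtos.all (fun p => (p.lookup "nome").isSome)) = true
instance (produtos : List (List (String × String))) : Decidable (Pre_separar_produtos produtos) := by unfold Pre_separar_produtos; infer_instance
def pvWitness_separar_produtos : (List (List (String × String))) := [[("nome", "Kit Baby")], [("nome", "Avulsa Tradicional")]]

def Spec_separar_produtos (produtos : List (List (String × String))) (out : (List (List (String × String))) × (List (List (String × String)))) : Prop := out = separar_produtos_alt produtos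
instance (produtos : List (List (String × String))) (out : (List (List (String × String))) × (List (List (String × String)))) : Decidable (Spec_separar_produtos produtos out) := by unfold Spec_separar_produtos; infer_instance

-- ===== CLAIM (what is proved, stated in full; the proofs are below) =====
def Claim_equal_separar_produtos : Prop := ∀ (produtos : List (List (String × String))), Dom_separar_produtos produtos → Pre_separar_produtos produtos → Spec_separar_produtos produtos (separar_produtos produtos)

-- ===== LEMMAS AND PROOFS =====
theorem sepStep_foldl (l : List (List (String × String)))
    (a b c d : List (List (String × String))) :
    l.foldl sepStep (a, b, c, d) =
      (a ++ l.filter (fun p => !PySem.Str.isIn "Avulsa" (nomeOf p) && !eh_baby (nomeOf p)),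
       b ++ l.filter (fun p => !PySem.Str.isIn "Avulsa" (nomeOf p) && eh_baby (nomeOf p)),
       c ++ l.filter (fun p => PySem.Str.isIn "Avulsa" (nomeOf p) && !eh_baby (nomeOf p)),
       d ++ l.filter (fun p => PySem.Str.isIn "Avulsa" (nomeOf p) && eh_baby (nomeOf p))) := by
  induction l generalizing a b c d with
  | nil => simp
  | cons p l ih =>
    simp only [List.foldl_cons, sepStep, List.filter_cons]
    cases hA : PySem.Str.isIn "Avulsa" (nomeOf p) <;> cases hB : eh_baby (nomeOf p) <;>
      simp [ih]

theorem filter_filter_comb (l : List (List (String × String))) (q r : List (String × String) → Bool) :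
    (l.filter q).filter r = l.filter (fun p => q p && r p) := by
  rw [List.filter_filter]
  exact List.filter_congr (fun p _ => by cases q p <;> cases r p <;> rfl)

-- ===== VERDICT (by name: the statement is the Claim_ definition above) =====
theorem separar_produtos_spec : Claim_equal_separar_produtos := by
  intro produtos _ _
  unfold Spec_separar_produtos separar_produtos separar_produtos_alt ordenar
  rw [sepStep_foldl]
  simp only [List.nil_append, filter_filter_comb]
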